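-- pv_equiv track=rewrite | github.com/AOMLDrifterTeam/DrifterDataAutomation | SIO_020.py | find_controller_details
-- ===== SOURCE A (Python) =====
-- def find_controller_details(lines):
--     controller_manuf = "NA"
--     controller_model = "NA"
--     duty_cycle = "NA"
--     antifouling = "NA"
--     Transmission_Cycle = "NA"
--
--     found_manuf = False
--     found_model = False
--     found_duty_cycle = False
--     found_antifouling = False
--     found_Transmission_Cycle = False
--
--     for line in lines:
--         if "Controller manufacturer" in line:
--             found_manuf = True
--         elif found_manuf and line.strip():
--             controller_manuf = line.strip()
--             found_manuf = False  # Reset flag after finding the next non-empty line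
--
--         if "Controller Generation" in line:
--             found_model = True
--         elif found_model and line.strip():
--             controller_model = line.strip()
--             found_model = False  # Reset flag after finding the next non-empty line
--
--         if "Duty cycle" in line:
--             found_duty_cycle = True
--         elif found_duty_cycle and line.strip():
--             duty_cycle = line.strip()
--             found_duty_cycle = False  # Reset flag after finding the next non-empty line
--
--         if "Antifouling" in line:
--             found_antifouling = True
--         elif found_antifouling and line.strip():
--             antifouling = line.strip()
--             found_antifouling = False  # Reset flag after finding the next non-empty line
--
--         if "Observation cycle" in line:
--             found_Transmission_Cycle = True
--         elif found_Transmission_Cycle and line.strip():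
--             Transmission_Cycle = line.strip()
--             found_Transmission_Cycle = False  # Reset flag after finding the next non-empty line
--
--     return controller_manuf, controller_model, duty_cycle, antifouling, Transmission_Cycle
-- ===== SOURCE B (Python) =====
-- def capture_after(lines, marker):
--     # keep only lines that matter: marker lines and non-empty lines
--     sig = [l for l in lines if marker in l or l.strip()]
--     # a capture is a non-marker significant line immediately following (among
--     # significant lines) a marker line; the last capture wins
--     vals = [b.strip() for a, b in zip(sig, sig[1:]) if marker in a and marker not in b]
--     return vals[-1] if vals else "NA"
--
--
-- def find_controller_details(lines):
--     return (capture_after(lines, "Controller manufacturer"),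
--             capture_after(lines, "Controller Generation"),
--             capture_after(lines, "Duty cycle"),
--             capture_after(lines, "Antifouling"),
--             capture_after(lines, "Observation cycle"))
-- ===== Notes on version B (the rewrite author's own statement) =====
-- stated objective: simpler
-- what changed: Replaces A's single interleaved pass with ten value/flag variables by five declarative per-marker queries: filter the significant lines, zip with the successor to pick strips of non-marker lines immediately following a marker line, take the last (default 'NA').
import Mathlib
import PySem

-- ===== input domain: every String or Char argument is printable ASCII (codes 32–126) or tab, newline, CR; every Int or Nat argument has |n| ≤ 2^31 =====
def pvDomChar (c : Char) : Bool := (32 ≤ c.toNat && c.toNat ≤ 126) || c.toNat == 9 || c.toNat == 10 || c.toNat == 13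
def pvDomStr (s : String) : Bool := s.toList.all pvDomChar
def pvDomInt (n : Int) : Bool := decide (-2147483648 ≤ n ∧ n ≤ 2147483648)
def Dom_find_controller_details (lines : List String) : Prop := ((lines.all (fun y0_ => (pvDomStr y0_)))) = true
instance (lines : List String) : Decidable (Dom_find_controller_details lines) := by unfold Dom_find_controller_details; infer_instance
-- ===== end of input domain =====

-- B replaces A's interleaved five-flag state machine by five filter/zip passes
-- (keep significant lines, capture strips of lines adjacent to a marker line,
-- take the last); objective: simpler, same return value.

-- ===== PORT A =====
-- one if/elif block of A's loop body (the five blocks are textually identical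
-- modulo the marker and their own value/flag pair)
def stepA (m : String) (p : String × Bool) (line : String) : String × Bool :=
  if PySem.Str.isIn m line then (p.1, true)
  else if p.2 && (PySem.Str.strip line != "") then (PySem.Str.strip line, false)
  else p

def find_controller_details (lines : List String) : String × String × String × String × String :=
  let r := lines.foldl
    (fun (s : (String × Bool) × (String × Bool) × (String × Bool) × (String × Bool) × (String × Bool)) line =>
      (stepA "Controller manufacturer" s.1 line,
       stepA "Controller Generation" s.2.1 line,
       stepA "Duty cycle" s.2.2.1 line,
       stepA "Antifouling" s.2.2.2.1 line,
       stepA "Observation cycle" s.2.2.2.2 line))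
    (("NA", false), ("NA", false), ("NA", false), ("NA", false), ("NA", false))
  (r.1.1, r.2.1.1, r.2.2.1.1, r.2.2.2.1.1, r.2.2.2.2.1)

-- ===== PORT B =====
-- zip(sig, sig[1:]) is List.zip sig sig.tail (exact: sig[1:] drops the head)
def capture_after (lines : List String) (marker : String) : String :=
  let sig := lines.filter (fun l => PySem.Str.isIn marker l || (PySem.Str.strip l != ""))
  let vals := ((sig.zip sig.tail).filter
      (fun ab => PySem.Str.isIn marker ab.1 && !PySem.Str.isIn marker ab.2)).map
      (fun ab => PySem.Str.strip ab.2)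
  match vals.getLast? with          -- vals[-1] if vals else "NA"
  | some v => v
  | none => "NA"

def find_controller_details_alt (lines : List String) : String × String × String × String × String :=
  (capture_after lines "Controller manufacturer",
   capture_after lines "Controller Generation",
   capture_after lines "Duty cycle",
   capture_after lines "Antifouling",
   capture_after lines "Observation cycle")

-- ===== PRECONDITION & SPEC =====
def Spec_find_controller_details (lines : List String) (out : String × String × String × String × String) : Prop := out = find_controller_details_alt lines
instance (lines : List String) (out : String × String × String × String × String) : Decidable (Spec_find_controller_details lines out) := by unfold Spec_find_controller_details; infer_instance

-- ===== CLAIM (what is proved, stated in full; the proofs are below) =====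
def Claim_equal_find_controller_details : Prop := ∀ (lines : List String), Dom_find_controller_details lines → Spec_find_controller_details lines (find_controller_details lines)

-- ===== LEMMAS AND PROOFS =====

-- last-capture list, generalized over the pending flag
def valsP (m : String) (p : Bool) : List String → List String
  | [] => []
  | l :: ls =>
      (if !PySem.Str.isIn m l && p then [PySem.Str.strip l] else []) ++
        valsP m (PySem.Str.isIn m l) ls

theorem getLast?_cons_getD (x v : String) (xs : List String) :
    ((x :: xs).getLast?).getD v = (xs.getLast?).getD x := by
  induction xs with
  | nil => rfl
  | cons y ys ih => cases ys <;> simp_all [List.getLast?]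

-- A's per-marker fold ignores insignificant lines
theorem foldl_stepA_filter (m : String) (ls : List String) : ∀ s : String × Bool,
    ls.foldl (stepA m) s =
      (ls.filter (fun l => PySem.Str.isIn m l || (PySem.Str.strip l != ""))).foldl (stepA m) s := by
  induction ls with
  | nil => intro s; rfl
  | cons l ls ih =>
      intro s
      by_cases hM : PySem.Chars.isIn m.toList l.toList = true
      · simp [List.foldl, hM, ih]
      · by_cases hS : PySem.Str.strip l = ""
        · have hstep : stepA m s l = s := by simp [stepA, hM, hS]
          simp [List.foldl, hM, hS, hstep, ih]
        · simp [List.foldl, hM, hS, ih]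

-- on significant lines the fold computes the last capture
theorem foldl_stepA_sig (m : String) (sig : List String)
    (h : ∀ l ∈ sig, (PySem.Str.isIn m l || (PySem.Str.strip l != "")) = true) :
    ∀ (p : Bool) (v : String),
      (sig.foldl (stepA m) (v, p)).1 = ((valsP m p sig).getLast?).getD v := by
  induction sig with
  | nil => intro p v; rfl
  | cons l ls ih =>
      intro p v
      have hl := h l (by simp)
      have h' : ∀ x ∈ ls, (PySem.Str.isIn m x || (PySem.Str.strip x != "")) = true := by
        intro x hx; exact h x (by simp [hx])
      by_cases hM : PySem.Chars.isIn m.toList l.toList = true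
      · simp [List.foldl, stepA, hM, valsP, ih h']
      · have hS : ¬ PySem.Str.strip l = "" := by
          intro hc; simp [hc, hM] at hl
        cases p with
        | false => simp [List.foldl, stepA, hM, valsP, ih h']
        | true => simp [List.foldl, stepA, hM, hS, valsP, ih h', getLast?_cons_getD]

-- the generalized capture list is B's zip/filter/map expression
theorem valsP_zip (m : String) (ls : List String) : ∀ a : String,
    valsP m (PySem.Str.isIn m a) ls =
      (((a :: ls).zip ls).filter
          (fun ab => PySem.Str.isIn m ab.1 && !PySem.Str.isIn m ab.2)).map
        (fun ab => PySem.Str.strip ab.2) := by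
  induction ls with
  | nil => intro a; rfl
  | cons b ls ih =>
      intro a
      simp only [valsP, List.zip_cons_cons, List.filter_cons, ih b]
      by_cases hA : PySem.Chars.isIn m.toList a.toList = true <;>
        by_cases hB : PySem.Chars.isIn m.toList b.toList = true <;>
          simp [hA, hB]

theorem capture_after_eq (m : String) (lines : List String) :
    (lines.foldl (stepA m) ("NA", false)).1 = capture_after lines m := by
  rw [foldl_stepA_filter m lines (("NA", false) : String × Bool)]
  have hsig : ∀ l ∈ lines.filter (fun l => PySem.Str.isIn m l || (PySem.Str.strip l != "")),
      (PySem.Str.isIn m l || (PySem.Str.strip l != "")) = true := by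
    intro l hl; exact (List.mem_filter.mp hl).2
  rw [foldl_stepA_sig m _ hsig false "NA"]
  simp only [capture_after]
  cases hfe : lines.filter (fun l => PySem.Str.isIn m l || (PySem.Str.strip l != "")) with
  | nil => rfl
  | cons a ls =>
      have hhead : valsP m false (a :: ls) = valsP m (PySem.Str.isIn m a) ls := by
        simp [valsP]
      rw [List.tail_cons, hhead, valsP_zip]
      cases h : ((((a :: ls).zip ls).filter
          (fun ab => PySem.Str.isIn m ab.1 && !PySem.Str.isIn m ab.2)).map
          (fun ab => PySem.Str.strip ab.2)).getLast? <;> rfl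

-- A's combined fold is the tuple of the five independent per-marker folds
theorem foldl_factor (ls : List String) :
    ∀ s : (String × Bool) × (String × Bool) × (String × Bool) × (String × Bool) × (String × Bool),
      ls.foldl
        (fun s line =>
          (stepA "Controller manufacturer" s.1 line,
           stepA "Controller Generation" s.2.1 line,
           stepA "Duty cycle" s.2.2.1 line,
           stepA "Antifouling" s.2.2.2.1 line,
           stepA "Observation cycle" s.2.2.2.2 line)) s =
      (ls.foldl (stepA "Controller manufacturer") s.1,
       ls.foldl (stepA "Controller Generation") s.2.1,
       ls.foldl (stepA "Duty cycle") s.2.2.1,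
       ls.foldl (stepA "Antifouling") s.2.2.2.1,
       ls.foldl (stepA "Observation cycle") s.2.2.2.2) := by
  induction ls with
  | nil => intro s; rfl
  | cons l ls ih => intro s; simp [List.foldl, ih]

-- ===== VERDICT (by name: the statement is the Claim_ definition above) =====
theorem find_controller_details_spec : Claim_equal_find_controller_details := by
  intro lines _
  unfold Spec_find_controller_details find_controller_details find_controller_details_alt
  simp only [foldl_factor]
  simp [capture_after_eq]
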